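-- pv_equiv track=rewrite | github.com/jmdrumsgarrison-ux/agentic-orchestrator | _extract/patches.py | patch_dockerfile_lines
-- ===== SOURCE A (Python) =====
-- from typing import List
--
-- def patch_dockerfile_lines(lines: List[str]) -> List[str]:
--     out = list(lines)
--
--     injected = []
--
--     if not any(' bash ' in l or l.strip().startswith('RUN apt-get') and 'bash' in l for l in out):
--         injected.append('RUN apt-get update && apt-get install -y --no-install-recommends bash && rm -rf /var/lib/apt/lists/*')
--     if not any("PYTHONPATH=" in l for l in out):
--         injected.append('ENV PYTHONPATH=/workspace/app')
--     if not any("CUDA_VISIBLE_DEVICES" in l for l in out):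
--         injected.append('ENV CUDA_VISIBLE_DEVICES=0')
--     if not any("DEBIAN_FRONTEND=noninteractive" in l for l in out):
--         injected.append('ENV DEBIAN_FRONTEND=noninteractive')
--     if not any(("tzdata" in l and "apt-get" in l) or ("libglib2.0-0" in l) for l in out):
--         injected.append('RUN apt-get update && apt-get install -y --no-install-recommends tzdata libglib2.0-0 libgl1 libsm6 libxext6 libxrender1 ffmpeg && rm -rf /var/lib/apt/lists/*')
--     if not any("OMP_NUM_THREADS" in l for l in out):
--         injected.append('ENV OMP_NUM_THREADS=1')
--     if not any("/workspace/app/user" in l for l in out):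
--         injected.append('RUN mkdir -p /workspace/app/user && chmod -R a+rwx /workspace || true')
--
--     # Place injections after first FROM
--     result = []
--     placed = False
--     for ln in out:
--         result.append(ln)
--         if not placed and ln.strip().lower().startswith("from "):
--             for add in injected:
--                 result.append(add)
--             placed = True
--     if not placed:
--         result = injected + result
--     return result
-- ===== SOURCE B (Python) =====
-- from typing import List
--
-- _DEFAULTS = [
--     'RUN apt-get update && apt-get install -y --no-install-recommends bash && rm -rf /var/lib/apt/lists/*',
--     'ENV PYTHONPATH=/workspace/app',
--     'ENV CUDA_VISIBLE_DEVICES=0',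
--     'ENV DEBIAN_FRONTEND=noninteractive',
--     'RUN apt-get update && apt-get install -y --no-install-recommends tzdata libglib2.0-0 libgl1 libsm6 libxext6 libxrender1 ffmpeg && rm -rf /var/lib/apt/lists/*',
--     'ENV OMP_NUM_THREADS=1',
--     'RUN mkdir -p /workspace/app/user && chmod -R a+rwx /workspace || true',
-- ]
--
-- def _satisfies(k, l):
--     if k == 0:
--         return ' bash ' in l or l.strip().startswith('RUN apt-get') and 'bash' in l
--     if k == 1:
--         return "PYTHONPATH=" in l
--     if k == 2:
--         return "CUDA_VISIBLE_DEVICES" in l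
--     if k == 3:
--         return "DEBIAN_FRONTEND=noninteractive" in l
--     if k == 4:
--         return ("tzdata" in l and "apt-get" in l) or ("libglib2.0-0" in l)
--     if k == 5:
--         return "OMP_NUM_THREADS" in l
--     return "/workspace/app/user" in l
--
-- def _insert_after_from(ls, injected):
--     # first line whose stripped/lowered form starts with "from ", or None
--     for i, ln in enumerate(ls):
--         if ln.strip().lower().startswith("from "):
--             return ls[:i + 1] + injected + ls[i + 1:]
--     return None
--
-- def patch_dockerfile_lines(lines: List[str]) -> List[str]:
--     # worklist of still-missing rule indices, shrunk against each line, early exit when empty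
--     missing = list(range(7))
--     for l in lines:
--         if not missing:
--             break
--         missing = [k for k in missing if not _satisfies(k, l)]
--     injected = [_DEFAULTS[k] for k in missing]
--     placed = _insert_after_from(lines, injected)
--     return injected + list(lines) if placed is None else placed
-- ===== Notes on version B (the rewrite author's own statement) =====
-- stated objective: alternative
-- what changed: B inverts the control structure: instead of A's seven separate any(...) scans over the lines plus a copy-and-insert placement loop, B maintains a shrinking worklist of missing rule indices (a declarative rules table) filtered against each line with early exit once the worklist is empty, maps the survivors to their default lines, and splices them around the first FROM line found by a dedicated search helper.
import Mathlib
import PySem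

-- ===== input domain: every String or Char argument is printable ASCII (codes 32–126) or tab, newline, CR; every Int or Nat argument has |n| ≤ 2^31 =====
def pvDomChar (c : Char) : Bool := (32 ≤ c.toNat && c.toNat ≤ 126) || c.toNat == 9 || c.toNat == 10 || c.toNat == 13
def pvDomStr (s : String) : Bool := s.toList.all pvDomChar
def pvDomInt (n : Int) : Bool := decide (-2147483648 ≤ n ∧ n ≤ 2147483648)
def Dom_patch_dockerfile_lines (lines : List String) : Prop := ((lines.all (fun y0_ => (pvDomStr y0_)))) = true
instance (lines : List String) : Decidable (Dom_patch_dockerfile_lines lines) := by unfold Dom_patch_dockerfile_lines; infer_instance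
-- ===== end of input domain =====

-- B replaces A's seven any(...) scans and copy/insert placement loop by a shrinking worklist of
-- missing rule indices (early exit when empty) mapped to a defaults table, spliced after the first FROM.

-- ===== PORT A =====
def patch_dockerfile_lines (lines : List String) : List String :=
  let out := lines
  let injected : List String := []
  let injected := if !(out.any fun l => PySem.Str.isIn " bash " l || (PySem.Str.startswith (PySem.Str.strip l) "RUN apt-get" && PySem.Str.isIn "bash" l)) then injected ++ ["RUN apt-get update && apt-get install -y --no-install-recommends bash && rm -rf /var/lib/apt/lists/*"] else injected
  let injected := if !(out.any fun l => PySem.Str.isIn "PYTHONPATH=" l) then injected ++ ["ENV PYTHONPATH=/workspace/app"] else injected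
  let injected := if !(out.any fun l => PySem.Str.isIn "CUDA_VISIBLE_DEVICES" l) then injected ++ ["ENV CUDA_VISIBLE_DEVICES=0"] else injected
  let injected := if !(out.any fun l => PySem.Str.isIn "DEBIAN_FRONTEND=noninteractive" l) then injected ++ ["ENV DEBIAN_FRONTEND=noninteractive"] else injected
  let injected := if !(out.any fun l => (PySem.Str.isIn "tzdata" l && PySem.Str.isIn "apt-get" l) || PySem.Str.isIn "libglib2.0-0" l) then injected ++ ["RUN apt-get update && apt-get install -y --no-install-recommends tzdata libglib2.0-0 libgl1 libsm6 libxext6 libxrender1 ffmpeg && rm -rf /var/lib/apt/lists/*"] else injected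
  let injected := if !(out.any fun l => PySem.Str.isIn "OMP_NUM_THREADS" l) then injected ++ ["ENV OMP_NUM_THREADS=1"] else injected
  let injected := if !(out.any fun l => PySem.Str.isIn "/workspace/app/user" l) then injected ++ ["RUN mkdir -p /workspace/app/user && chmod -R a+rwx /workspace || true"] else injected
  -- Place injections after first FROM
  let rp := out.foldl (fun (st : List String × Bool) ln =>
      let result := st.1 ++ [ln]
      if !st.2 && PySem.Str.startswith (PySem.Str.lower (PySem.Str.strip ln)) "from " then
        (result ++ injected, true)
      else (result, st.2)) ([], false)
  if !rp.2 then injected ++ rp.1 else rp.1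

-- ===== PORT B =====
-- the declarative defaults table _DEFAULTS
def pvDefaults : List String :=
  ["RUN apt-get update && apt-get install -y --no-install-recommends bash && rm -rf /var/lib/apt/lists/*",
   "ENV PYTHONPATH=/workspace/app",
   "ENV CUDA_VISIBLE_DEVICES=0",
   "ENV DEBIAN_FRONTEND=noninteractive",
   "RUN apt-get update && apt-get install -y --no-install-recommends tzdata libglib2.0-0 libgl1 libsm6 libxext6 libxrender1 ffmpeg && rm -rf /var/lib/apt/lists/*",
   "ENV OMP_NUM_THREADS=1",
   "RUN mkdir -p /workspace/app/user && chmod -R a+rwx /workspace || true"]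

-- _satisfies(k, l): whether line l already satisfies rule k
def pvSat (k : Int) (l : String) : Bool :=
  if k = 0 then PySem.Str.isIn " bash " l || (PySem.Str.startswith (PySem.Str.strip l) "RUN apt-get" && PySem.Str.isIn "bash" l)
  else if k = 1 then PySem.Str.isIn "PYTHONPATH=" l
  else if k = 2 then PySem.Str.isIn "CUDA_VISIBLE_DEVICES" l
  else if k = 3 then PySem.Str.isIn "DEBIAN_FRONTEND=noninteractive" l
  else if k = 4 then (PySem.Str.isIn "tzdata" l && PySem.Str.isIn "apt-get" l) || PySem.Str.isIn "libglib2.0-0" l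
  else if k = 5 then PySem.Str.isIn "OMP_NUM_THREADS" l
  else PySem.Str.isIn "/workspace/app/user" l

-- _insert_after_from: splice injected after the first FROM line, or None
def pvInsertAfterFrom (ls injected : List String) : Option (List String) :=
  (PySem.List.enumerate ls).findSome? (fun p =>
    if PySem.Str.startswith (PySem.Str.lower (PySem.Str.strip p.2)) "from " then
      some (PySem.List.slice ls none (some (p.1 + 1)) ++ injected ++ PySem.List.slice ls (some (p.1 + 1)) none)
    else none)

-- the worklist loop: for l in lines: if not missing: break; missing = [k for k in missing if not _satisfies(k,l)]
def pvLoop : List Int → List String → List Int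
  | missing, [] => missing
  | missing, l :: ls => if missing.isEmpty then missing else pvLoop (missing.filter (fun k => !pvSat k l)) ls

def patch_dockerfile_lines_alt (lines : List String) : List String :=
  let missing := pvLoop (PySem.List.pyRange 0 7 1) lines
  -- _DEFAULTS[k]: k is always a surviving index of range(7), so in range; .getD "" only totalizes
  let injected := missing.map (fun k => (PySem.List.pyGet? pvDefaults k).getD "")
  match pvInsertAfterFrom lines injected with
  | none => injected ++ lines
  | some r => r

-- ===== PRECONDITION & SPEC =====
def Spec_patch_dockerfile_lines (lines : List String) (out : List String) : Prop := out = patch_dockerfile_lines_alt lines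
instance (lines : List String) (out : List String) : Decidable (Spec_patch_dockerfile_lines lines out) := by unfold Spec_patch_dockerfile_lines; infer_instance

-- ===== CLAIM (what is proved, stated in full; the proofs are below) =====
def Claim_equal_patch_dockerfile_lines : Prop := ∀ (lines : List String), Dom_patch_dockerfile_lines lines → Spec_patch_dockerfile_lines lines (patch_dockerfile_lines lines)

-- ===== LEMMAS AND PROOFS =====

-- the worklist loop keeps exactly the rules no line satisfies
theorem pvLoop_eq (ls : List String) : ∀ (m : List Int),
    pvLoop m ls = m.filter (fun k => !ls.any (pvSat k)) := by
  induction ls with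
  | nil => intro m; simp [pvLoop]
  | cons l ls ih =>
    intro m
    rw [pvLoop]
    by_cases hm : m.isEmpty
    · rw [if_pos hm]
      rw [List.isEmpty_iff.mp hm]
      simp
    · rw [if_neg hm, ih, List.filter_filter]
      apply List.filter_congr
      intro k _
      cases h : pvSat k l <;> simp [h]

-- the search helper over the enumerate list, generalized over the offset
theorem pvFindEnumAux (ls inj : List String) (xs : List String) : ∀ (s : Int),
    (PySem.List.enumerate xs s).findSome? (fun p =>
        if PySem.Str.startswith (PySem.Str.lower (PySem.Str.strip p.2)) "from " then
          some (PySem.List.slice ls none (some (p.1 + 1)) ++ inj ++ PySem.List.slice ls (some (p.1 + 1)) none)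
        else none) =
      (xs.findIdx? (fun l => PySem.Str.startswith (PySem.Str.lower (PySem.Str.strip l)) "from ")).map
        (fun (n : Nat) => PySem.List.slice ls none (some (s + (n : Int) + 1)) ++ inj ++ PySem.List.slice ls (some (s + (n : Int) + 1)) none) := by
  induction xs with
  | nil => intro s; simp [PySem.List.enumerate_nil]
  | cons x xs ih =>
    intro s
    rw [PySem.List.enumerate_cons, List.findSome?_cons, List.findIdx?_cons]
    by_cases hq : PySem.Str.startswith (PySem.Str.lower (PySem.Str.strip x)) "from " = true
    · rw [if_pos hq, if_pos hq]
      simp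
    · rw [if_neg hq, if_neg hq]
      dsimp only
      rw [ih, Option.map_map]
      cases xs.findIdx? (fun l => PySem.Str.startswith (PySem.Str.lower (PySem.Str.strip l)) "from ") with
      | none => rfl
      | some n =>
        simp only [Option.map_some, Function.comp_apply]
        have e : s + 1 + (n : Int) + 1 = s + ((n + 1 : Nat) : Int) + 1 := by push_cast; ring
        rw [e]

-- the search helper characterised by the index of the first FROM line
theorem pvInsert_eq (ls inj : List String) :
    pvInsertAfterFrom ls inj =
      (ls.findIdx? (fun l => PySem.Str.startswith (PySem.Str.lower (PySem.Str.strip l)) "from ")).map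
        (fun (n : Nat) => ls.take (n + 1) ++ inj ++ ls.drop (n + 1)) := by
  unfold pvInsertAfterFrom
  rw [pvFindEnumAux ls inj ls 0]
  cases h : ls.findIdx? (fun l => PySem.Str.startswith (PySem.Str.lower (PySem.Str.strip l)) "from ") with
  | none => rfl
  | some n =>
    simp only [Option.map_some, zero_add]
    have e : ((n : Int) + 1) = ((n + 1 : Nat) : Int) := by push_cast; ring
    rw [e, PySem.List.slice_to_natCast, PySem.List.slice_from_natCast]

-- A's placement loop once 'placed' is set: it just copies the rest
theorem pvPlaceA_true (inj : List String) (xs : List String) : ∀ acc,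
    xs.foldl (fun (st : List String × Bool) ln =>
      let result := st.1 ++ [ln]
      if !st.2 && PySem.Str.startswith (PySem.Str.lower (PySem.Str.strip ln)) "from " then
        (result ++ inj, true)
      else (result, st.2)) (acc, true) = (acc ++ xs, true) := by
  induction xs with
  | nil => intro acc; simp
  | cons x xs ih =>
    intro acc
    rw [List.foldl_cons]
    simp only [Bool.not_true, Bool.false_and, Bool.false_eq_true, if_false]
    rw [ih, ← List.append_cons]

-- A's placement loop characterised by the index of the first FROM line
theorem pvPlaceA (inj : List String) (xs : List String) : ∀ acc,
    xs.foldl (fun (st : List String × Bool) ln =>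
      let result := st.1 ++ [ln]
      if !st.2 && PySem.Str.startswith (PySem.Str.lower (PySem.Str.strip ln)) "from " then
        (result ++ inj, true)
      else (result, st.2)) (acc, false) =
      match xs.findIdx? (fun l => PySem.Str.startswith (PySem.Str.lower (PySem.Str.strip l)) "from ") with
      | none => (acc ++ xs, false)
      | some n => (acc ++ xs.take (n + 1) ++ inj ++ xs.drop (n + 1), true) := by
  induction xs with
  | nil => intro acc; simp
  | cons x xs ih =>
    intro acc
    rw [List.findIdx?_cons, List.foldl_cons]
    dsimp only
    simp only [Bool.not_false, Bool.true_and]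
    by_cases hq : PySem.Str.startswith (PySem.Str.lower (PySem.Str.strip x)) "from " = true
    · rw [if_pos hq, if_pos hq, pvPlaceA_true]
      simp
    · rw [if_neg hq, if_neg hq, ih]
      cases h : xs.findIdx? (fun l => PySem.Str.startswith (PySem.Str.lower (PySem.Str.strip l)) "from ") <;>
        simp [List.append_assoc]

theorem pvSat0 : pvSat 0 = fun l => PySem.Str.isIn " bash " l || (PySem.Str.startswith (PySem.Str.strip l) "RUN apt-get" && PySem.Str.isIn "bash" l) := rfl
theorem pvSat1 : pvSat 1 = fun l => PySem.Str.isIn "PYTHONPATH=" l := rfl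
theorem pvSat2 : pvSat 2 = fun l => PySem.Str.isIn "CUDA_VISIBLE_DEVICES" l := rfl
theorem pvSat3 : pvSat 3 = fun l => PySem.Str.isIn "DEBIAN_FRONTEND=noninteractive" l := rfl
theorem pvSat4 : pvSat 4 = fun l => (PySem.Str.isIn "tzdata" l && PySem.Str.isIn "apt-get" l) || PySem.Str.isIn "libglib2.0-0" l := rfl
theorem pvSat5 : pvSat 5 = fun l => PySem.Str.isIn "OMP_NUM_THREADS" l := rfl
theorem pvSat6 : pvSat 6 = fun l => PySem.Str.isIn "/workspace/app/user" l := rfl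

theorem pvRange7 : PySem.List.pyRange 0 7 1 = [0, 1, 2, 3, 4, 5, 6] := by decide

-- B's injected list equals A's chain of conditional appends
set_option maxHeartbeats 2000000 in
theorem pvInjected (lines : List String) :
    ((pvLoop (PySem.List.pyRange 0 7 1) lines).map (fun k => (PySem.List.pyGet? pvDefaults k).getD "")) =
      (let injected : List String := []
       let injected := if !(lines.any fun l => PySem.Str.isIn " bash " l || (PySem.Str.startswith (PySem.Str.strip l) "RUN apt-get" && PySem.Str.isIn "bash" l)) then injected ++ ["RUN apt-get update && apt-get install -y --no-install-recommends bash && rm -rf /var/lib/apt/lists/*"] else injected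
       let injected := if !(lines.any fun l => PySem.Str.isIn "PYTHONPATH=" l) then injected ++ ["ENV PYTHONPATH=/workspace/app"] else injected
       let injected := if !(lines.any fun l => PySem.Str.isIn "CUDA_VISIBLE_DEVICES" l) then injected ++ ["ENV CUDA_VISIBLE_DEVICES=0"] else injected
       let injected := if !(lines.any fun l => PySem.Str.isIn "DEBIAN_FRONTEND=noninteractive" l) then injected ++ ["ENV DEBIAN_FRONTEND=noninteractive"] else injected
       let injected := if !(lines.any fun l => (PySem.Str.isIn "tzdata" l && PySem.Str.isIn "apt-get" l) || PySem.Str.isIn "libglib2.0-0" l) then injected ++ ["RUN apt-get update && apt-get install -y --no-install-recommends tzdata libglib2.0-0 libgl1 libsm6 libxext6 libxrender1 ffmpeg && rm -rf /var/lib/apt/lists/*"] else injected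
       let injected := if !(lines.any fun l => PySem.Str.isIn "OMP_NUM_THREADS" l) then injected ++ ["ENV OMP_NUM_THREADS=1"] else injected
       if !(lines.any fun l => PySem.Str.isIn "/workspace/app/user" l) then injected ++ ["RUN mkdir -p /workspace/app/user && chmod -R a+rwx /workspace || true"] else injected) := by
  dsimp only
  rw [pvLoop_eq, pvRange7]
  simp only [List.filter_cons, List.filter_nil, pvSat0, pvSat1, pvSat2, pvSat3, pvSat4, pvSat5, pvSat6]
  split_ifs <;> rfl

-- ===== VERDICT (by name: the statement is the Claim_ definition above) =====
theorem patch_dockerfile_lines_spec : Claim_equal_patch_dockerfile_lines := by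
  intro lines _
  unfold Spec_patch_dockerfile_lines patch_dockerfile_lines patch_dockerfile_lines_alt
  dsimp only
  rw [pvPlaceA, pvInsert_eq, pvInjected lines]
  dsimp only
  cases h : lines.findIdx? (fun l => PySem.Str.startswith (PySem.Str.lower (PySem.Str.strip l)) "from ") with
  | none => simp
  | some n => simp [List.append_assoc]
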